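-- pv_equiv track=rewrite | github.com/Moataz-E/coding_problems | leetcode/python/medium/1131_maximum_absolute_value_expression.py | max_diff_comps
-- ===== SOURCE A (Python) =====
-- from typing import List
--
-- def max_diff_comps(arr:List[int]) -> int:
--     """Finds max difference in a compressed array."""
--     min_val = float('inf')
--     max_val = float('-inf')
--     max_diff = 0
--     for i in range(len(arr)):
--         min_val = min(min_val, arr[i])
--         max_val = max(max_val, arr[i])
--         max_diff = max(
--             max_diff,
--             abs(arr[i] - min_val),
--             abs(arr[i] - max_val)
--         )
--     return max_diff
-- ===== SOURCE B (Python) =====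
-- def max_diff_comps(arr):
--     """Finds max difference in a compressed array."""
--     if not arr:
--         return 0
--     return max(arr) - min(arr)
-- ===== Notes on version B (the rewrite author's own statement) =====
-- stated objective: simpler
-- what changed: Replaces A's single manual pass maintaining running min/max and absolute-difference bookkeeping with the closed-form spread max(arr) - min(arr) via builtins, guarding the empty list to return 0 as A does.
import Mathlib
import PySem

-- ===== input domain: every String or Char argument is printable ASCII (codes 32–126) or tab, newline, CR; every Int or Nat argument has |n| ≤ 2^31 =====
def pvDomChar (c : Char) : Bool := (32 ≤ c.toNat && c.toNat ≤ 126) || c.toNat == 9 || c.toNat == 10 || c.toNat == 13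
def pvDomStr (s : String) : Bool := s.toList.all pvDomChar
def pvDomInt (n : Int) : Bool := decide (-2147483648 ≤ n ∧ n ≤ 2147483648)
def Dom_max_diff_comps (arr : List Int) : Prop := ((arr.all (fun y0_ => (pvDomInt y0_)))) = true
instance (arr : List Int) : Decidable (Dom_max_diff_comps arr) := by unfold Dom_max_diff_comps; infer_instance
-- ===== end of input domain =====

-- B replaces A's single manual pass with running min/max and abs-difference bookkeeping
-- by the closed-form spread max(arr) - min(arr) (0 for the empty list): simpler.


-- ===== PORT A =====
-- min_val/max_val start at ±inf; they are modelled as Option Int with none = not-yet-seen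
-- (min(inf, x) = x, max(-inf, x) = x), which is exact since the loop body replaces the
-- infinity by an int on the first iteration before it is ever subtracted.
def max_diff_comps (arr : List Int) : Int :=
  (arr.foldl
    (fun (s : Option Int × Option Int × Int) x =>
      let mn := match s.1 with | none => x | some m => min m x
      let mx := match s.2.1 with | none => x | some m => max m x
      (some mn, some mx, max (max s.2.2 |x - mn|) |x - mx|))
    (none, none, 0)).2.2

-- ===== PORT B =====
def max_diff_comps_alt (arr : List Int) : Int :=
  match arr with
  | [] => 0
  | _ =>
    match PySem.List.max? arr (fun y => y), PySem.List.min? arr (fun y => y) with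
    | some mx, some mn => mx - mn
    | _, _ => 0

-- ===== PRECONDITION & SPEC =====
def Spec_max_diff_comps (arr : List Int) (out : Int) : Prop := out = max_diff_comps_alt arr
instance (arr : List Int) (out : Int) : Decidable (Spec_max_diff_comps arr out) := by unfold Spec_max_diff_comps; infer_instance

-- ===== CLAIM (what is proved, stated in full; the proofs are below) =====
def Claim_equal_max_diff_comps : Prop := ∀ (arr : List Int), Dom_max_diff_comps arr → Spec_max_diff_comps arr (max_diff_comps arr)

-- ===== LEMMAS AND PROOFS =====

theorem max_diff_loop_inv (t : List Int) (mn mx : Int) (hle : mn ≤ mx) :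
    t.foldl
      (fun (s : Option Int × Option Int × Int) x =>
        let mn := match s.1 with | none => x | some m => min m x
        let mx := match s.2.1 with | none => x | some m => max m x
        (some mn, some mx, max (max s.2.2 |x - mn|) |x - mx|))
      (some mn, some mx, mx - mn)
    = (some (t.foldl min mn), some (t.foldl max mx), t.foldl max mx - t.foldl min mn) := by
  induction t generalizing mn mx with
  | nil => simp
  | cons x t ih =>
    simp only [List.foldl_cons]
    have h1 : |x - min mn x| = x - min mn x := abs_of_nonneg (by simp [min_def]; split <;> omega)
    have h2 : |x - max mx x| = max mx x - x := by
      rw [abs_of_nonpos (by simp [max_def]; split <;> omega)]; ring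
    have hd : max (max (mx - mn) |x - min mn x|) |x - max mx x|
        = max mx x - min mn x := by
      rw [h1, h2]
      simp only [min_def, max_def]
      split_ifs <;> omega
    have := ih (min mn x) (max mx x) (le_trans (min_le_left _ _) (le_trans hle (le_max_left _ _)))
    simp only [hd]
    exact this

theorem max_diff_comps_spec : Claim_equal_max_diff_comps := by
  intro arr _
  unfold Spec_max_diff_comps max_diff_comps max_diff_comps_alt
  match arr with
  | [] => rfl
  | x :: t =>
    simp only [List.foldl_cons, PySem.List.max?_id_cons, PySem.List.min?_id_cons]
    have := max_diff_loop_inv t x x le_rfl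
    simp only [abs_zero, max_self, show x - x = (0:Int) by ring] at this ⊢
    rw [this]
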